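/- GENERATED by tools/from_farm_form.py from prooffarm-gif/accepted/DGifGetExtensionNext.1/Proof.lean (a worked proof of the farm's unit `DGifGetExtensionNext.1`,
   accepted by the verdict) — do not edit. -/
import Gif.Spec.Units.DGifGetExtensionNext_1
import Gif.Spec.AllSegs
import Gif.Spec.Proved.DGifGetExtensionNext_1_Lemmas

open X86 X86.User Asan ProgX.Base ProgX.Base.Spec Gif.Spec

/-!
  `DGifGetExtensionNext.1` (0x10986c … 0x1098a6, 13 instructions; dgif_lib.c:600-606): A BODY SEGMENT OF A PROTECTED FUNCTION WITH A
  CALL IN THE MIDDLE. The return address 0x10988b (`ret2`) of `InternalRead(gif, &Buf, 1)` is not a cut of the design, so the unit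
  makes it one of its own: the private assertion `gen1_AtRet2` (`Body` + `r15 = pv` + the count in `eax`) and two walks
  (Lemmas.lean), chained here.
-/

namespace Gif.Spec.DGifGetExtensionNext_1
end Gif.Spec.DGifGetExtensionNext_1

/-- Segment 1 of `DGifGetExtensionNext` takes `Start` at 0x10986c to `Done` at 0x1098a6 or to `AfterLen` at 0x1098c3. -/
theorem Gif.Spec.Proved.DGifGetExtensionNext_1_ok : Gif.Spec.DGifGetExtensionNext_1.Statement := by
  unfold Gif.Spec.DGifGetExtensionNext_1.Statement
  intro Lay hLay μ hμ u₀ hcode h_InternalRead h_asan_load8_noabort h_asan_store4_noabort H rest frames F R e ret v hat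
  -- the callee's contract for the frame list of the body (the own frame in front) and the request of 1 byte
  have hir := h_InternalRead H rest (DGifGetExtensionNext.framesIn frames e) F R 1
  -- 0x10986c … the checked load of `gif.Private` … the call … 0x10988b
  refine (Gif.Spec.DGifGetExtensionNext_1.gen1_seg_call Lay hLay μ hμ u₀ hcode H rest frames F R e ret hir
    h_asan_load8_noabort v hat).trans ?_
  -- 0x10988b … 0x1098a6 (`Done`) or 0x1098c3 (`AfterLen`)
  intro v1 hv1
  exact Gif.Spec.DGifGetExtensionNext_1.gen1_seg_tail Lay hLay μ hμ u₀ hcode H rest frames F R e ret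
    h_asan_store4_noabort v1 hv1
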